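-- pv_equiv track=rewrite | github.com/Starnsworth/prg435_extras | passSeqCheck.py | checkPassSeq
-- ===== SOURCE A (Python) =====
-- def checkPassSeq(string, length=3):
--     for i in range(len(string) - length + 1):
--         chunk = string[i:i + length]
--         asc = all(ord(chunk[j+1]) - ord(chunk[j]) == 1 for j in range(length - 1))
--         dsc = all(ord(chunk[j+1]) - ord(chunk[j]) == -1 for j in range(length - 1))
--         if asc or dsc:
--             return True, chunk
--     return False, None
-- ===== SOURCE B (Python) =====
-- def checkPassSeq(string, length=3):
--     # Single left-to-right pass tracking the current ascending and descending
--     # run lengths; report the first window that reaches the requested length.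
--     if length <= 1:
--         # a run of at most one character is trivially present
--         return (True, string[:length]) if len(string) >= length else (False, None)
--     run_up = 1
--     run_dn = 1
--     for i in range(1, len(string)):
--         d = ord(string[i]) - ord(string[i - 1])
--         run_up = run_up + 1 if d == 1 else 1
--         run_dn = run_dn + 1 if d == -1 else 1
--         if run_up >= length or run_dn >= length:
--             return True, string[i - length + 1:i + 1]
--     return False, None
-- ===== Notes on version B (the rewrite author's own statement) =====
-- stated objective: faster
-- what changed: Replaces A's scan over all windows with a per-window all() re-check by a single pass maintaining current ascending/descending run lengths, returning the first window whose run reaches the requested length.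
import Mathlib
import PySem

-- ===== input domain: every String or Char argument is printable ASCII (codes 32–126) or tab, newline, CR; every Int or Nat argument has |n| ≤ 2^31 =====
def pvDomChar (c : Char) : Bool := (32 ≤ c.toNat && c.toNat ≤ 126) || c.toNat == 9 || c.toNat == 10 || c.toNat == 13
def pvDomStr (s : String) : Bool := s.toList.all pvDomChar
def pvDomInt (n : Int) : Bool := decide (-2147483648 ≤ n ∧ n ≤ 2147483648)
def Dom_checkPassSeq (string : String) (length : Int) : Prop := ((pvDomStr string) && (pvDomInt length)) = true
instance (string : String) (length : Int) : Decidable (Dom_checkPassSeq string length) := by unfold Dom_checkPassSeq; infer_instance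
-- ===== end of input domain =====

-- B replaces A's window-by-window rescan with one pass tracking the current
-- ascending/descending run lengths (objective: faster, O(n) vs O(n*length)).

-- ord(c)
def pvOrd (c : Char) : Int := (c.toNat : Int)

-- ===== PORT A =====
-- all(ord(chunk[j+1]) - ord(chunk[j]) == delta for j in range(length - 1))
-- (indices j, j+1 are always in range inside A's loop, so the getD default is never used — exact)
def pvChunkAll (chunk : List Char) (length : Int) (delta : Int) : Bool :=
  (PySem.List.pyRange 0 (length - 1) 1).all (fun j =>
    pvOrd (PySem.List.pyGetD chunk (j + 1) 'a') - pvOrd (PySem.List.pyGetD chunk j 'a') == delta)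

-- the 'for i in range(...)' loop with its early return (index recursion: the
-- range is iterated, never materialised, exactly like Python's lazy range)
def pvAGo (cs : List Char) (length stop : Int) (i : Int) : Bool × Option String :=
  if h : i < stop then
    let chunk := PySem.List.slice cs (some i) (some (i + length))
    let asc := pvChunkAll chunk length 1
    let dsc := pvChunkAll chunk length (-1)
    if asc || dsc then (true, some (String.ofList chunk)) else pvAGo cs length stop (i + 1)
  else (false, none)
termination_by (stop - i).toNat
decreasing_by omega

def checkPassSeq (string : String) (length : Int) : Bool × Option String :=
  pvAGo string.toList length ((string.toList.length : Int) - length + 1) 0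

-- ===== PORT B =====
-- the 'for i in range(1, len(string))' loop of Source B with state (run_up, run_dn)
def pvBGo (cs : List Char) (length : Int) : List Int → Int → Int → Bool × Option String
  | [], _, _ => (false, none)
  | i :: rest, runUp, runDn =>
    let d := pvOrd (PySem.List.pyGetD cs i 'a') - pvOrd (PySem.List.pyGetD cs (i - 1) 'a')
    let runUp' := if d == 1 then runUp + 1 else 1
    let runDn' := if d == -1 then runDn + 1 else 1
    if runUp' ≥ length || runDn' ≥ length then
      (true, some (String.ofList (PySem.List.slice cs (some (i - length + 1)) (some (i + 1)))))
    else pvBGo cs length rest runUp' runDn'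

def checkPassSeq_alt (string : String) (length : Int) : Bool × Option String :=
  if length ≤ 1 then
    if length ≤ (string.toList.length : Int) then
      (true, some (String.ofList (PySem.List.slice string.toList none (some length))))
    else (false, none)
  else pvBGo string.toList length (PySem.List.pyRange 1 (string.toList.length : Int) 1) 1 1

-- ===== PRECONDITION & SPEC =====
def Spec_checkPassSeq (string : String) (length : Int) (out : Bool × Option String) : Prop := out = checkPassSeq_alt string length
instance (string : String) (length : Int) (out : Bool × Option String) : Decidable (Spec_checkPassSeq string length out) := by unfold Spec_checkPassSeq; infer_instance

-- ===== CLAIM (what is proved, stated in full; the proofs are below) =====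
def Claim_equal_checkPassSeq : Prop := ∀ (string : String) (length : Int), Dom_checkPassSeq string length → Spec_checkPassSeq string length (checkPassSeq string length)

-- ===== LEMMAS AND PROOFS =====

-- difference of adjacent character codes, cs[t+1] - cs[t]
def pvD (cs : List Char) (t : Nat) : Int := pvOrd (cs.getD (t + 1) 'a') - pvOrd (cs.getD t 'a')

-- length of the maximal run of diffs equal to delta ending just before index t
def pvU (cs : List Char) (delta : Int) : Nat → Nat
  | 0 => 0
  | t + 1 => if pvD cs t = delta then pvU cs delta t + 1 else 0

-- window of k diffs starting at i is all-ascending or all-descending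
def pvQual (cs : List Char) (k : Nat) (i : Nat) : Bool :=
  decide ((∀ m < k, pvD cs (i + m) = 1) ∨ (∀ m < k, pvD cs (i + m) = -1))

-- common characterisation: first qualifying window start, for 2 ≤ l
def pvSpec (cs : List Char) (l : Int) : Bool × Option String :=
  match (List.range (cs.length + 1 - l.toNat)).find? (pvQual cs (l.toNat - 1)) with
  | some i => (true, some (String.ofList ((cs.drop i).take l.toNat)))
  | none => (false, none)

-- list-indexed form of A's loop, used only in the proofs
def pvAGoList (cs : List Char) (length : Int) : List Int → Bool × Option String
  | [] => (false, none)
  | i :: rest =>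
    let chunk := PySem.List.slice cs (some i) (some (i + length))
    let asc := pvChunkAll chunk length 1
    let dsc := pvChunkAll chunk length (-1)
    if asc || dsc then (true, some (String.ofList chunk)) else pvAGoList cs length rest

lemma pvAGo_eq_list (cs : List Char) (l stop : Int) :
    ∀ (fuel : Nat) (i : Int), (stop - i).toNat ≤ fuel →
      pvAGo cs l stop i = pvAGoList cs l (PySem.List.pyRange i stop 1) := by
  intro fuel
  induction fuel with
  | zero =>
    intro i hf
    have hge : stop ≤ i := by omega
    rw [pvAGo, dif_neg (by omega), PySem.List.pyRange_one_eq_nil hge]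
    rfl
  | succ fuel ih =>
    intro i hf
    by_cases hlt : i < stop
    · rw [pvAGo, dif_pos hlt, PySem.List.pyRange_one_cons hlt]
      simp only [pvAGoList]
      split
      · rfl
      · exact ih (i + 1) (by omega)
    · rw [pvAGo, dif_neg hlt, PySem.List.pyRange_one_eq_nil (by omega)]
      rfl

lemma pvU_le (cs : List Char) (delta : Int) : ∀ t, pvU cs delta t ≤ t := by
  intro t
  induction t with
  | zero => simp [pvU]
  | succ t ih => simp only [pvU]; split <;> omega

lemma pvU_ge_iff (cs : List Char) (delta : Int) :
    ∀ t k, k ≤ t → (k ≤ pvU cs delta t ↔ ∀ m, t - k ≤ m → m < t → pvD cs m = delta) := by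
  intro t
  induction t with
  | zero =>
    intro k hk; interval_cases k
    simp only [pvU, Nat.le_zero, Nat.le_refl, true_iff]
    intro m h1 h2; omega
  | succ t ih =>
    intro k hk
    cases k with
    | zero =>
      simp only [Nat.zero_le, true_iff]
      intro m h1 h2; omega
    | succ k' =>
      have hk' : k' ≤ t := by omega
      constructor
      · intro h m hm1 hm2
        simp only [pvU] at h
        by_cases hd : pvD cs t = delta
        · rw [if_pos hd] at h
          rcases Nat.lt_or_ge m t with hm | hm
          · exact ((ih k' hk').mp (by omega : k' ≤ pvU cs delta t)) m (by omega) hm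
          · have : m = t := by omega
            rw [this]; exact hd
        · simp [hd] at h
      · intro h
        have hd : pvD cs t = delta := h t (by omega) (by omega)
        simp only [pvU, if_pos hd]
        have : k' ≤ pvU cs delta t :=
          (ih k' hk').mpr (fun m hm1 hm2 => h m (by omega) (by omega))
        omega

lemma pvFind?_range_eq_some {p : Nat → Bool} {R i0 : Nat} (h1 : i0 < R) (h2 : p i0 = true)
    (h3 : ∀ j < i0, p j = false) : (List.range R).find? p = some i0 := by
  have hR : R = i0 + (R - i0) := by omega
  rw [hR, List.range_add, List.find?_append]
  have hnone : (List.range i0).find? p = none :=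
    List.find?_eq_none.mpr (fun x hx => by simp [h3 x (List.mem_range.mp hx)])
  rw [hnone]
  obtain ⟨k, hk⟩ : ∃ k, R - i0 = k + 1 := ⟨R - i0 - 1, by omega⟩
  rw [hk, List.range_succ_eq_map]
  simp [List.find?_cons, h2]

-- chunk indexing: the j-th char of the window starting at i is cs[i+j]
lemma pvChunk_getD (cs : List Char) (i lN j : Nat) (hin : i + lN ≤ cs.length) (hj : j < lN) :
    ((cs.drop i).take lN).getD j 'a' = cs.getD (i + j) 'a' := by
  have h1 : ((cs.drop i).take lN)[j]? = (cs.drop i)[j]? := List.getElem?_take_of_lt hj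
  have h2 : (cs.drop i)[j]? = cs[i + j]? := List.getElem?_drop ..
  simp [List.getD, h1, h2]

lemma pvSlice_eq (cs : List Char) (l : Int) (hl : 0 ≤ l) (i : Nat) :
    PySem.List.slice cs (some (i : Int)) (some ((i : Int) + l)) = (cs.drop i).take l.toNat := by
  have hlN : ((l.toNat : Nat) : Int) = l := Int.toNat_of_nonneg hl
  rw [← hlN, PySem.List.slice_natCast_add, Int.toNat_natCast]

lemma pvChunkAll_eq (cs : List Char) (l : Int) (hl : 2 ≤ l) (i : Nat)
    (hin : i + l.toNat ≤ cs.length) (delta : Int) :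
    pvChunkAll (PySem.List.slice cs (some (i : Int)) (some ((i : Int) + l))) l delta
      = decide (∀ m < l.toNat - 1, pvD cs (i + m) = delta) := by
  rw [pvSlice_eq cs l (by omega) i]
  unfold pvChunkAll
  rw [PySem.List.pyRange_one]
  have hlN : (l - 1 - 0).toNat = l.toNat - 1 := by omega
  rw [hlN, List.all_map, Bool.eq_iff_iff]
  simp only [List.all_eq_true, List.mem_range, Function.comp, zero_add,
    decide_eq_true_eq, beq_iff_eq]
  constructor
  · intro h m hm
    have := h m hm
    rw [show ((m : Int) + 1) = (((m + 1 : Nat)) : Int) by push_cast; ring] at this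
    rw [PySem.List.pyGetD_natCast, PySem.List.pyGetD_natCast] at this
    rw [pvChunk_getD cs i l.toNat (m+1) hin (by omega),
        pvChunk_getD cs i l.toNat m hin (by omega)] at this
    simpa [pvD, Nat.add_assoc] using this
  · intro h m hm
    have := h m hm
    rw [show ((m : Int) + 1) = (((m + 1 : Nat)) : Int) by push_cast; ring]
    rw [PySem.List.pyGetD_natCast, PySem.List.pyGetD_natCast]
    rw [pvChunk_getD cs i l.toNat (m+1) hin (by omega),
        pvChunk_getD cs i l.toNat m hin (by omega)]
    simpa [pvD, Nat.add_assoc] using this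

-- A's loop over a list of Nat start indices is a first-match search
lemma pvAGo_eq (cs : List Char) (l : Int) (hl : 2 ≤ l) :
    ∀ is : List Nat, (∀ i ∈ is, i + l.toNat ≤ cs.length) →
      pvAGoList cs l (is.map (Nat.cast : Nat → Int)) =
        match is.find? (pvQual cs (l.toNat - 1)) with
        | some i => (true, some (String.ofList ((cs.drop i).take l.toNat)))
        | none => (false, none) := by
  intro is h
  induction is with
  | nil => simp [pvAGoList]
  | cons i rest ih =>
    have hin : i + l.toNat ≤ cs.length := h i (by simp)
    rw [List.map_cons]
    simp only [pvAGoList]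
    rw [pvChunkAll_eq cs l hl i hin 1, pvChunkAll_eq cs l hl i hin (-1),
        pvSlice_eq cs l (by omega) i]
    have hdec : (decide (∀ m < l.toNat - 1, pvD cs (i + m) = 1) ||
        decide (∀ m < l.toNat - 1, pvD cs (i + m) = -1)) = pvQual cs (l.toNat - 1) i := by
      unfold pvQual
      simp
    rw [hdec]
    cases hq : pvQual cs (l.toNat - 1) i with
    | true => rw [List.find?_cons_of_pos hq]; simp
    | false =>
      rw [List.find?_cons_of_neg (by simp [hq])]
      exact ih (fun j hj => h j (by simp [hj]))

-- if no window qualifies, the search comes up empty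
lemma pvSpec_none (cs : List Char) (l : Int) (hl : 2 ≤ l)
    (hno : ∀ i : Nat, i + (l.toNat - 1) < cs.length → pvQual cs (l.toNat - 1) i = false) :
    pvSpec cs l = (false, none) := by
  unfold pvSpec
  have hfind : (List.range (cs.length + 1 - l.toNat)).find? (pvQual cs (l.toNat - 1)) = none := by
    apply List.find?_eq_none.mpr
    intro i hi
    have hi' := List.mem_range.mp hi
    have h2 : 2 ≤ l.toNat := by omega
    simp [hno i (by omega)]
  rw [hfind]

-- a run of length l.toNat - 1 ending at char u, nothing earlier ⇒ the search hits u - (l.toNat - 1)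
lemma pvSpec_hit (cs : List Char) (l : Int) (hl : 2 ≤ l) (u : Nat) (hu : u < cs.length)
    (delta : Int) (hdelta : delta = 1 ∨ delta = -1) (h : l.toNat - 1 ≤ pvU cs delta u)
    (hno : ∀ i : Nat, i + (l.toNat - 1) < u → pvQual cs (l.toNat - 1) i = false) :
    pvSpec cs l = (true, some (String.ofList ((cs.drop (u - (l.toNat - 1))).take l.toNat))) := by
  have h2 : 2 ≤ l.toNat := by omega
  have hle : l.toNat - 1 ≤ u := le_trans h (pvU_le cs delta u)
  have hall : ∀ m, u - (l.toNat - 1) ≤ m → m < u → pvD cs m = delta :=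
    (pvU_ge_iff cs delta u (l.toNat - 1) hle).mp h
  have hqual : pvQual cs (l.toNat - 1) (u - (l.toNat - 1)) = true := by
    unfold pvQual
    rcases hdelta with rfl | rfl
    · exact decide_eq_true (Or.inl (fun m hm => hall (u - (l.toNat - 1) + m) (by omega) (by omega)))
    · exact decide_eq_true (Or.inr (fun m hm => hall (u - (l.toNat - 1) + m) (by omega) (by omega)))
  unfold pvSpec
  rw [pvFind?_range_eq_some (by omega) hqual (fun j hj => hno j (by omega))]

-- if the run counters stayed below l through char u, no window ends at char u
lemma pvQual_false_of_small (cs : List Char) (l : Int) (hl : 2 ≤ l) (i u : Nat)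
    (hiu : i + (l.toNat - 1) = u)
    (hc : ¬ (l.toNat - 1 ≤ pvU cs 1 u ∨ l.toNat - 1 ≤ pvU cs (-1) u)) :
    pvQual cs (l.toNat - 1) i = false := by
  have h2 : 2 ≤ l.toNat := by omega
  rw [Bool.eq_false_iff]
  intro hq
  rcases decide_eq_true_iff.mp hq with hall | hall
  · exact hc (Or.inl ((pvU_ge_iff cs 1 u (l.toNat - 1) (by omega)).mpr
      (fun m hm1 hm2 => by
        have := hall (m - i) (by omega)
        simpa [show i + (m - i) = m by omega] using this)))
  · exact hc (Or.inr ((pvU_ge_iff cs (-1) u (l.toNat - 1) (by omega)).mpr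
      (fun m hm1 hm2 => by
        have := hall (m - i) (by omega)
        simpa [show i + (m - i) = m by omega] using this)))

-- B's loop: invariant = run counters + no qualifying window ends before t
lemma pvBGo_eq (cs : List Char) (l : Int) (hl : 2 ≤ l) :
    ∀ (fuel t : Nat), cs.length - t ≤ fuel → 1 ≤ t →
      (∀ i : Nat, i + (l.toNat - 1) < t → pvQual cs (l.toNat - 1) i = false) →
      pvBGo cs l (PySem.List.pyRange (t : Int) (cs.length : Int) 1)
        ((pvU cs 1 (t - 1) : Int) + 1) ((pvU cs (-1) (t - 1) : Int) + 1) = pvSpec cs l := by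
  have h2 : 2 ≤ l.toNat := by omega
  intro fuel
  induction fuel with
  | zero =>
    intro t hf ht hno
    have hge : cs.length ≤ t := by omega
    rw [PySem.List.pyRange_one_eq_nil (by exact_mod_cast hge)]
    rw [show pvBGo cs l [] ((pvU cs 1 (t - 1) : Int) + 1) ((pvU cs (-1) (t - 1) : Int) + 1)
        = (false, none) from rfl]
    exact (pvSpec_none cs l hl (fun i hi => hno i (by omega))).symm
  | succ fuel ih =>
    intro t hf ht hno
    rcases Nat.lt_or_ge t cs.length with hlt | hge
    · obtain ⟨sN, rfl⟩ : ∃ sN, t = sN + 1 := ⟨t - 1, by omega⟩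
      rw [PySem.List.pyRange_one_cons (by exact_mod_cast hlt)]
      simp only [pvBGo]
      have hd : pvOrd (PySem.List.pyGetD cs ((sN + 1 : Nat) : Int) 'a')
          - pvOrd (PySem.List.pyGetD cs (((sN + 1 : Nat) : Int) - 1) 'a') = pvD cs sN := by
        have h1 : ((sN + 1 : Nat) : Int) - 1 = ((sN : Nat) : Int) := by push_cast; ring
        rw [h1, PySem.List.pyGetD_natCast, PySem.List.pyGetD_natCast]
        simp [pvD, List.getD]
      rw [hd]
      have hru : (if (pvD cs sN == 1) = true
            then ((pvU cs 1 (sN + 1 - 1) : Int) + 1) + 1 else 1)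
          = (pvU cs 1 (sN + 1) : Int) + 1 := by
        by_cases hcase : pvD cs sN = 1 <;> simp [pvU, hcase]
      have hrd : (if (pvD cs sN == -1) = true
            then ((pvU cs (-1) (sN + 1 - 1) : Int) + 1) + 1 else 1)
          = (pvU cs (-1) (sN + 1) : Int) + 1 := by
        by_cases hcase : pvD cs sN = -1 <;> simp [pvU, hcase]
      rw [hru, hrd]
      by_cases hc : (l.toNat - 1 ≤ pvU cs 1 (sN + 1) ∨ l.toNat - 1 ≤ pvU cs (-1) (sN + 1))
      · have hcond : (decide ((pvU cs 1 (sN + 1) : Int) + 1 ≥ l)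
            || decide ((pvU cs (-1) (sN + 1) : Int) + 1 ≥ l)) = true := by
          rcases hc with h | h
          · have hx : ((pvU cs 1 (sN + 1) : Int) + 1 ≥ l) := by omega
            simp [hx]
          · have hx : ((pvU cs (-1) (sN + 1) : Int) + 1 ≥ l) := by omega
            simp [hx]
        rw [hcond, if_pos rfl]
        have hdelta : ∃ delta : Int, (delta = 1 ∨ delta = -1) ∧ l.toNat - 1 ≤ pvU cs delta (sN + 1) := by
          rcases hc with h | h
          · exact ⟨1, Or.inl rfl, h⟩
          · exact ⟨-1, Or.inr rfl, h⟩
        obtain ⟨delta, hd01, hdge⟩ := hdelta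
        rw [pvSpec_hit cs l hl (sN + 1) hlt delta hd01 hdge hno]
        have hle : l.toNat - 1 ≤ sN + 1 := le_trans hdge (pvU_le cs delta (sN + 1))
        have e1 : ((sN + 1 : Nat) : Int) - l + 1 = ((sN + 1 - (l.toNat - 1) : Nat) : Int) := by omega
        have e2 : ((sN + 1 : Nat) : Int) + 1 = ((sN + 1 - (l.toNat - 1) : Nat) : Int) + l := by omega
        rw [e1, e2, pvSlice_eq cs l (by omega) (sN + 1 - (l.toNat - 1))]
      · have hcond : (decide ((pvU cs 1 (sN + 1) : Int) + 1 ≥ l)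
            || decide ((pvU cs (-1) (sN + 1) : Int) + 1 ≥ l)) = false := by
          push_neg at hc
          have hx1 : ¬ ((pvU cs 1 (sN + 1) : Int) + 1 ≥ l) := by omega
          have hx2 : ¬ ((pvU cs (-1) (sN + 1) : Int) + 1 ≥ l) := by omega
          simp [hx1, hx2]
        rw [hcond]
        simp only [Bool.false_eq_true, if_false]
        have hstep : ((sN + 1 : Nat) : Int) + 1 = ((sN + 2 : Nat) : Int) := by push_cast; ring
        rw [hstep]
        have hno' : ∀ i : Nat, i + (l.toNat - 1) < sN + 2 → pvQual cs (l.toNat - 1) i = false := by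
          intro i hi
          rcases Nat.lt_or_ge (i + (l.toNat - 1)) (sN + 1) with hlt' | hge'
          · exact hno i hlt'
          · exact pvQual_false_of_small cs l hl i (sN + 1) (by omega) hc
        have := ih (sN + 2) (by omega) (by omega) hno'
        simpa using this
    · rw [PySem.List.pyRange_one_eq_nil (by exact_mod_cast hge)]
      rw [show pvBGo cs l [] ((pvU cs 1 (t - 1) : Int) + 1) ((pvU cs (-1) (t - 1) : Int) + 1)
          = (false, none) from rfl]
      exact (pvSpec_none cs l hl (fun i hi => hno i (by omega))).symm

lemma pvA_spec (cs : List Char) (l : Int) (hl : 2 ≤ l) :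
    pvAGo cs l ((cs.length : Int) - l + 1) 0 = pvSpec cs l := by
  rw [pvAGo_eq_list cs l _ ((cs.length : Int) - l + 1 - 0).toNat 0 (le_refl _)]
  have hR : ((cs.length : Int) - l + 1 - 0).toNat = cs.length + 1 - l.toNat := by omega
  rw [PySem.List.pyRange_one, hR]
  have hmap : (List.range (cs.length + 1 - l.toNat)).map (fun k : Nat => (0 : Int) + k)
      = (List.range (cs.length + 1 - l.toNat)).map (Nat.cast : Nat → Int) := by
    simp
  rw [hmap, pvAGo_eq cs l hl _ (fun i hi => by
    have := List.mem_range.mp hi; omega)]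
  rfl

lemma pvB_spec (cs : List Char) (l : Int) (hl : 2 ≤ l) :
    pvBGo cs l (PySem.List.pyRange 1 (cs.length : Int) 1) 1 1 = pvSpec cs l := by
  have h0 : ((pvU cs 1 0 : Int) + 1) = 1 := by simp [pvU]
  have h1 : ((pvU cs (-1) 0 : Int) + 1) = 1 := by simp [pvU]
  have := pvBGo_eq cs l hl cs.length 1 (by omega) (by omega)
    (fun i hi => by exfalso; omega)
  simpa [pvU] using this

-- ===== VERDICT (by name: the statement is the Claim_ definition above) =====
theorem checkPassSeq_spec : Claim_equal_checkPassSeq := by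
  intro s l _
  show checkPassSeq s l = checkPassSeq_alt s l
  by_cases hl : l ≤ 1
  · unfold checkPassSeq checkPassSeq_alt
    rw [if_pos hl]
    by_cases hle : l ≤ ((s.toList.length : Int))
    · rw [if_pos hle]
      rw [pvAGo_eq_list s.toList l _ ((s.toList.length : Int) - l + 1 - 0).toNat 0 (le_refl _)]
      rw [PySem.List.pyRange_one_cons (by omega)]
      simp only [pvAGoList]
      have hasc : pvChunkAll (PySem.List.slice s.toList (some 0) (some (0 + l))) l 1 = true := by
        unfold pvChunkAll
        rw [PySem.List.pyRange_one_eq_nil (by omega)]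
        rfl
      rw [hasc]
      simp only [Bool.true_or, if_true]
      rw [zero_add, PySem.List.slice_zero_start]
    · rw [if_neg (by omega)]
      rw [pvAGo_eq_list s.toList l _ ((s.toList.length : Int) - l + 1 - 0).toNat 0 (le_refl _)]
      rw [PySem.List.pyRange_one_eq_nil (by omega)]
      rfl
  · unfold checkPassSeq checkPassSeq_alt
    rw [if_neg (by omega)]
    rw [pvA_spec s.toList l (by omega), pvB_spec s.toList l (by omega)]
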